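-- pv_equiv track=rewrite | github.com/openai/parameter-golf | train_gpt_mlx_novel.py | token_chunks
-- ===== SOURCE A (Python) =====
-- def token_chunks(total_tokens: int, seq_len: int, max_chunk_tokens: int) -> list[int]:
--     usable_total = (total_tokens // seq_len) * seq_len
--     if usable_total <= 0:
--         raise ValueError(f"token budget too small for seq_len={seq_len}")
--     usable_chunk = max((max_chunk_tokens // seq_len) * seq_len, seq_len)
--     chunks = []
--     remaining = usable_total
--     while remaining > 0:
--         chunk = min(remaining, usable_chunk)
--         chunks.append(chunk)
--         remaining -= chunk
--     return chunks
-- ===== SOURCE B (Python) =====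
-- def token_chunks(total_tokens: int, seq_len: int, max_chunk_tokens: int) -> list[int]:
--     usable_total = (total_tokens // seq_len) * seq_len
--     if usable_total <= 0:
--         raise ValueError(f"token budget too small for seq_len={seq_len}")
--     usable_chunk = max((max_chunk_tokens // seq_len) * seq_len, seq_len)
--     n, remainder = divmod(usable_total, usable_chunk)
--     return [usable_chunk] * n + ([remainder] if remainder else [])
-- ===== Notes on version B (the rewrite author's own statement) =====
-- stated objective: simpler
-- what changed: Replaces the repeated-subtraction while loop with closed-form divmod arithmetic: n full chunks via list multiplication plus an optional remainder.
-- outside the precondition, e.g. on token_chunks(5, -2, -4): A does not finish within the time limit, B returns []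
import Mathlib
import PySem

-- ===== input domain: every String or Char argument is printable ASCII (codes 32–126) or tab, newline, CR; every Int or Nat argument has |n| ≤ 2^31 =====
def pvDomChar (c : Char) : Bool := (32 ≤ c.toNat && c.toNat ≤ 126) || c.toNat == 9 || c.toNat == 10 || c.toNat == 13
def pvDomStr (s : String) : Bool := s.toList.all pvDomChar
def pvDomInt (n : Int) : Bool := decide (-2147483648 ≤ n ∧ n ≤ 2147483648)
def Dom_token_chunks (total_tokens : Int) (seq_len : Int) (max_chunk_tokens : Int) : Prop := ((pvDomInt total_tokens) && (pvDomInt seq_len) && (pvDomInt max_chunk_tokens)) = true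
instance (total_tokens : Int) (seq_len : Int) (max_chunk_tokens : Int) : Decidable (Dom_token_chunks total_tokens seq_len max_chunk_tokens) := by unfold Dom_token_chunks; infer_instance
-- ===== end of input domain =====

-- B replaces A's repeated-subtraction while loop with closed-form divmod arithmetic (simpler).

-- ===== PORT A =====
-- the while loop of A; the `usable_chunk ≤ 0` branch only makes the function total
-- (Python diverges there; such inputs are outside Pre_token_chunks)
def tcLoop (usable_chunk : Int) (remaining : Int) (chunks : List Int) : List Int :=
  if _h : 0 < remaining then
    if _hc : 0 < usable_chunk then
      tcLoop usable_chunk (remaining - min remaining usable_chunk)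
        (chunks ++ [min remaining usable_chunk])
    else chunks
  else chunks
termination_by remaining.toNat
decreasing_by
  have h1 : min remaining usable_chunk > 0 := by omega
  omega

def token_chunks (total_tokens : Int) (seq_len : Int) (max_chunk_tokens : Int) : List Int :=
  let usable_total := (PySem.Int.floordiv total_tokens seq_len) * seq_len
  if usable_total ≤ 0 then []  -- Python raises ValueError here (outside Pre_)
  else
    let usable_chunk := max ((PySem.Int.floordiv max_chunk_tokens seq_len) * seq_len) seq_len
    tcLoop usable_chunk usable_total []

-- ===== PORT B =====
def token_chunks_alt (total_tokens : Int) (seq_len : Int) (max_chunk_tokens : Int) : List Int :=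
  let usable_total := (PySem.Int.floordiv total_tokens seq_len) * seq_len
  if usable_total ≤ 0 then []  -- Python raises ValueError here (outside Pre_)
  else
    let usable_chunk := max ((PySem.Int.floordiv max_chunk_tokens seq_len) * seq_len) seq_len
    let n := PySem.Int.floordiv usable_total usable_chunk
    let remainder := PySem.Int.mod usable_total usable_chunk
    List.replicate n.toNat usable_chunk ++ (if remainder ≠ 0 then [remainder] else [])

-- ===== PRECONDITION & SPEC =====
-- Pre_ excludes: seq_len = 0 (Python ZeroDivisionError), usable_total ≤ 0 (Python ValueError),
-- and usable_chunk ≤ 0 (only reachable with seq_len < 0; Python's while loop diverges there).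
-- On every input A returns a value, Pre_ holds.
def Pre_token_chunks (total_tokens : Int) (seq_len : Int) (max_chunk_tokens : Int) : Prop :=
  seq_len ≠ 0 ∧
  0 < (PySem.Int.floordiv total_tokens seq_len) * seq_len ∧
  0 < max ((PySem.Int.floordiv max_chunk_tokens seq_len) * seq_len) seq_len
instance (total_tokens : Int) (seq_len : Int) (max_chunk_tokens : Int) : Decidable (Pre_token_chunks total_tokens seq_len max_chunk_tokens) := by unfold Pre_token_chunks; infer_instance
def pvWitness_token_chunks : Int × Int × Int := (10, 3, 7)

def Spec_token_chunks (total_tokens : Int) (seq_len : Int) (max_chunk_tokens : Int) (out : List Int) : Prop := out = token_chunks_alt total_tokens seq_len max_chunk_tokens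
instance (total_tokens : Int) (seq_len : Int) (max_chunk_tokens : Int) (out : List Int) : Decidable (Spec_token_chunks total_tokens seq_len max_chunk_tokens out) := by unfold Spec_token_chunks; infer_instance

-- ===== CLAIM (what is proved, stated in full; the proofs are below) =====
def Claim_equal_token_chunks : Prop := ∀ (total_tokens : Int) (seq_len : Int) (max_chunk_tokens : Int), Dom_token_chunks total_tokens seq_len max_chunk_tokens → Pre_token_chunks total_tokens seq_len max_chunk_tokens → Spec_token_chunks total_tokens seq_len max_chunk_tokens (token_chunks total_tokens seq_len max_chunk_tokens)

-- ===== LEMMAS AND PROOFS =====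

-- the loop unfolds to the closed divmod form, for any accumulator
theorem tcLoop_closed_aux (uc : Int) (huc : 0 < uc) :
    ∀ (k : Nat) (rem : Int), 0 ≤ rem → rem.toNat ≤ k → ∀ (acc : List Int),
      tcLoop uc rem acc =
        acc ++ List.replicate (PySem.Int.floordiv rem uc).toNat uc ++
          (if PySem.Int.mod rem uc ≠ 0 then [PySem.Int.mod rem uc] else []) := by
  intro k
  induction k with
  | zero =>
    intro rem h0 hk acc
    have hrem : rem = 0 := by omega
    subst hrem
    rw [tcLoop]
    simp [PySem.Int.floordiv, PySem.Int.mod, Int.fdiv, Int.fmod]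
  | succ k ih =>
    intro rem h0 hk acc
    rw [PySem.Int.floordiv_eq_ediv_of_pos huc, PySem.Int.mod_eq_emod_of_pos huc]
    by_cases hpos : 0 < rem
    · rw [tcLoop, dif_pos hpos, dif_pos huc]
      by_cases hge : uc ≤ rem
      · have hmin : min rem uc = uc := by omega
        rw [hmin, ih (rem - uc) (by omega) (by omega),
            PySem.Int.floordiv_eq_ediv_of_pos huc, PySem.Int.mod_eq_emod_of_pos huc]
        have hdiv : rem / uc = (rem - uc) / uc + 1 := by
          have := Int.add_mul_ediv_right (rem - uc) 1 (by omega : uc ≠ 0)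
          simp only [one_mul] at this
          rw [← this]; ring_nf
        have hmod : (rem - uc) % uc = rem % uc := Int.sub_emod_right rem uc
        have hnn : 0 ≤ (rem - uc) / uc := Int.ediv_nonneg (by omega) (by omega)
        have htn : (rem / uc).toNat = ((rem - uc) / uc).toNat + 1 := by
          rw [hdiv]; omega
        rw [hmod, htn, List.replicate_succ]
        simp
      · have hmin : min rem uc = rem := by omega
        rw [hmin, sub_self, tcLoop, dif_neg (by omega : ¬ (0:Int) < 0)]
        have hdiv : rem / uc = 0 := Int.ediv_eq_zero_of_lt (by omega) (by omega)
        have hmod : rem % uc = rem := Int.emod_eq_of_lt (by omega) (by omega)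
        rw [hdiv, hmod, if_pos (by omega : rem ≠ 0)]
        simp
    · have hrem : rem = 0 := by omega
      subst hrem
      rw [tcLoop]
      simp

theorem token_chunks_spec : Claim_equal_token_chunks := by
  intro t s m _hd hpre
  obtain ⟨hs, hut, huc⟩ := hpre
  unfold Spec_token_chunks token_chunks token_chunks_alt
  simp only [if_neg (by omega : ¬ (PySem.Int.floordiv t s) * s ≤ 0)]
  exact (tcLoop_closed_aux _ huc _ _ (by omega) (le_refl _) []).trans (by simp)
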